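-- pv_equiv track=rewrite | github.com/KaileZhu/KaileZhu | TMOS/LTL_MAS_C-action/src/baseline/sampling_based/planner.py | symbols_extracter
-- ===== SOURCE A (Python) =====
-- def symbols_extracter(string):
-- 	symbols_set = set()
-- 	symbol = ''
-- 	for i in string:
-- 		if i not in '|() &!':
-- 			symbol = symbol + i
-- 		else:
-- 			if symbol != '':
-- 				symbols_set.add(symbol)
-- 				symbol = ''
-- 	return symbols_set
-- ===== SOURCE B (Python) =====
-- def symbols_extracter(string):
--     # Index-based tokenizer: slice out the segment between consecutive delimiters.
--     out = set()
--     prev = 0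
--     for i, c in enumerate(string):
--         if c in '|() &!':
--             if i > prev:
--                 out.add(string[prev:i])
--             prev = i + 1
--     return out
-- ===== Notes on version B (the rewrite author's own statement) =====
-- stated objective: alternative
-- what changed: Replaces A's char-by-char accumulator with flush-on-delimiter by an index-based single pass over enumerate(string) that records the previous cut position and slices each delimiter-terminated segment out of the string wholesale; no running symbol buffer is maintained.
import Mathlib
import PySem

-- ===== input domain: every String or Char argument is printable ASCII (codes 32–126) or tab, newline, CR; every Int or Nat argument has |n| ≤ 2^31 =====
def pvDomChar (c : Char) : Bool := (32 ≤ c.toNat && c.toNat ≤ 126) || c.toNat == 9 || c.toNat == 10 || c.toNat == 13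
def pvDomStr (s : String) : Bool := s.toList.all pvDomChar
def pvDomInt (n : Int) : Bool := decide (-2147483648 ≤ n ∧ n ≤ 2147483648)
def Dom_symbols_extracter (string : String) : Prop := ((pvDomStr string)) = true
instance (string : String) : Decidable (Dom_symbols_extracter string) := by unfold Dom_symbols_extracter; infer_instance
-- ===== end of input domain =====

-- B replaces A's char-accumulator/flush loop by an index-based pass over enumerate(string)
-- that slices each delimiter-terminated segment out of the string wholesale (alternative
-- decomposition, same cost); like A, it emits only segments terminated by a delimiter.

-- ===== PORT A =====
def symbols_extracter (string : String) : List String :=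
  (List.foldl
    (fun (st : List String × String) (i : Char) =>
      if PySem.Str.isIn (String.singleton i) "|() &!" = false then
        (st.1, st.2 ++ String.singleton i)
      else if st.2 ≠ "" then (PySem.Set.add st.1 st.2, "")
      else st)
    (PySem.Set.empty, "") string.toList).1

-- ===== PORT B =====
def symbols_extracter_alt (string : String) : List String :=
  (List.foldl
    (fun (st : List String × Int) (p : Int × Char) =>
      if PySem.Str.isIn (String.singleton p.2) "|() &!" = true then
        ((if p.1 > st.2 then PySem.Set.add st.1 (PySem.Str.slice string (some st.2) (some p.1)) else st.1), p.1 + 1)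
      else st)
    (PySem.Set.empty, 0) (PySem.List.enumerate string.toList 0)).1

-- ===== PRECONDITION & SPEC =====
def Spec_symbols_extracter (string : String) (out : List String) : Prop := out = symbols_extracter_alt string
instance (string : String) (out : List String) : Decidable (Spec_symbols_extracter string out) := by unfold Spec_symbols_extracter; infer_instance

-- ===== CLAIM (what is proved, stated in full; the proofs are below) =====
def Claim_equal_symbols_extracter : Prop := ∀ (string : String), Dom_symbols_extracter string → Spec_symbols_extracter string (symbols_extracter string)

-- ===== LEMMAS AND PROOFS =====

-- named forms of the two ports' fold loops (definitionally the same lambdas)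
def pvFoldA (S : List String) (sym : String) (cs : List Char) : List String × String :=
  List.foldl
    (fun (st : List String × String) (i : Char) =>
      if PySem.Str.isIn (String.singleton i) "|() &!" = false then
        (st.1, st.2 ++ String.singleton i)
      else if st.2 ≠ "" then (PySem.Set.add st.1 st.2, "")
      else st)
    (S, sym) cs

def pvFoldB (string : String) (S : List String) (prev : Int) (ps : List (Int × Char)) : List String × Int :=
  List.foldl
    (fun (st : List String × Int) (p : Int × Char) =>
      if PySem.Str.isIn (String.singleton p.2) "|() &!" = true then
        ((if p.1 > st.2 then PySem.Set.add st.1 (PySem.Str.slice string (some st.2) (some p.1)) else st.1), p.1 + 1)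
      else st)
    (S, prev) ps

lemma pvIsIn_singleton (c : Char) (t : String) :
    PySem.Str.isIn (String.singleton c) t = decide (c ∈ t.toList) := by
  by_cases h : c ∈ t.toList
  · have h1 : PySem.Chars.isIn [c] t.toList = true := by
      rw [PySem.Chars.isIn_iff_infix]
      obtain ⟨u, v, he⟩ := List.append_of_mem h
      exact ⟨u, v, by rw [he]; simp⟩
    simp [PySem.Str.isIn, h1, h]
  · have h1 : PySem.Chars.isIn [c] t.toList = false := by
      rw [PySem.Chars.isIn_eq_false_iff]
      intro hin
      exact h (List.singleton_sublist.mp hin.sublist)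
    simp [PySem.Str.isIn, h1, h]

lemma pv_inv (s : String) (cs : List Char) :
    ∀ (k prev : Nat) (S : List String),
      s.toList.drop k = cs → prev ≤ k →
      (pvFoldA S (String.ofList ((s.toList.drop prev).take (k - prev))) cs).1 =
      (pvFoldB s S (prev : Int) (PySem.List.enumerate cs (k : Int))).1 := by
  induction cs with
  | nil => intro k prev S _ _; simp [pvFoldA, pvFoldB, PySem.List.enumerate]
  | cons c cs ih =>
    intro k prev S hk hp
    have hlen : k < s.toList.length := by
      have h := congrArg List.length hk
      simp only [List.length_drop, List.length_cons] at h
      omega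
    have hget : s.toList[k]? = some c := by
      rw [← List.head?_drop, hk]; rfl
    have hdrop1 : s.toList.drop (k + 1) = cs := by
      have h : List.drop 1 (List.drop k s.toList) = s.toList.drop (k + 1) := by
        rw [List.drop_drop]
      rw [← h, hk]; rfl
    have hcast : ((k : Int) + 1) = (((k + 1 : Nat)) : Int) := by push_cast; ring
    rw [PySem.List.enumerate_cons]
    unfold pvFoldA pvFoldB
    simp only [List.foldl_cons]
    rw [pvIsIn_singleton c]
    by_cases hc : c ∈ ("|() &!" : String).toList
    · rw [decide_eq_true hc]
      simp only [reduceIte]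
      by_cases hpk : prev < k
      · have hseg : ((s.toList.drop prev).take (k - prev)) ≠ [] := by
          have hl : ((s.toList.drop prev).take (k - prev)).length = min (k - prev) (s.toList.length - prev) := by
            simp only [List.length_take, List.length_drop]
          intro hnil
          rw [hnil] at hl
          simp only [List.length_nil] at hl
          omega
        have hsym : (String.ofList ((s.toList.drop prev).take (k - prev))) ≠ "" := by
          intro h
          exact hseg (by simpa using congrArg String.toList h)
        rw [if_pos hsym]
        rw [if_pos (by exact_mod_cast hpk : ((prev : Int) < (k : Int)))]
        have hslice : PySem.Str.slice s (some (prev : Int)) (some (k : Int)) =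
            String.ofList ((s.toList.drop prev).take (k - prev)) := by
          simp [PySem.Str.slice, PySem.Chars.slice_eq_listSlice, PySem.List.slice_natCast]
        rw [hslice, hcast]
        have h2 := ih (k + 1) (k + 1) (PySem.Set.add S (String.ofList ((s.toList.drop prev).take (k - prev)))) hdrop1 (le_refl _)
        unfold pvFoldA pvFoldB at h2
        rw [Nat.sub_self, List.take_zero] at h2
        exact h2
      · have hpe : prev = k := by omega
        subst hpe
        rw [Nat.sub_self, List.take_zero]
        rw [if_neg (by simp : ¬ ((String.ofList ([] : List Char)) ≠ ""))]
        rw [if_neg (lt_irrefl ((prev : Int)))]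
        rw [hcast]
        have h2 := ih (prev + 1) (prev + 1) S hdrop1 (le_refl _)
        unfold pvFoldA pvFoldB at h2
        rw [Nat.sub_self, List.take_zero] at h2
        exact h2
    · rw [decide_eq_false hc]
      simp only [reduceIte]
      have happ : String.ofList ((s.toList.drop prev).take (k - prev)) ++ String.singleton c =
          String.ofList ((s.toList.drop prev).take (k + 1 - prev)) := by
        apply String.toList_inj.mp
        simp only [String.toList_append, String.toList_ofList]
        have h1 : k + 1 - prev = (k - prev) + 1 := by omega
        rw [h1, List.take_add_one]
        have h2 : (s.toList.drop prev)[k - prev]? = some c := by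
          rw [List.getElem?_drop]
          have h3 : prev + (k - prev) = k := by omega
          rw [h3, hget]
        rw [h2]
        simp [String.singleton]
      rw [happ, hcast]
      have h2 := ih (k + 1) prev S hdrop1 (by omega)
      unfold pvFoldA pvFoldB at h2
      exact h2

-- ===== VERDICT (by name: the statement is the Claim_ definition above) =====
theorem symbols_extracter_spec : Claim_equal_symbols_extracter := by
  intro s _
  show symbols_extracter s = symbols_extracter_alt s
  have h := pv_inv s s.toList 0 0 PySem.Set.empty (by simp) (le_refl 0)
  simpa [symbols_extracter, symbols_extracter_alt, pvFoldA, pvFoldB] using h
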